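-- pv_equiv track=rewrite | github.com/rainbowved/General | WT_client_stage_C31/wt_client/core/pack_smoke.py | _resolve_requirements
-- ===== SOURCE A (Python) =====
-- from typing import Iterable, List, Set, Tuple, Optional, Dict
--
-- def _resolve_requirements(children: Set[str]) -> Tuple[List[str], List[str], List[str]]:
--     found: List[str] = []
--     missing: List[str] = []
--     matched: List[str] = []
--
--     # concept: allow either `concept/` folder OR any `concept*` file/folder shipped at root
--     concept_ok = ("concept/" in children) or any(c.startswith("concept") for c in children)
--     if concept_ok:
--         found.append("concept/")
--         for c in sorted(children):
--             if c.startswith("concept"):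
--                 matched.append(c)
--                 break
--     else:
--         missing.append("concept/")
--
--     # db_bundle: allow exact `db_bundle/` OR versioned `db_bundle_*` dir
--     db_ok = ("db_bundle/" in children) or any(c.startswith("db_bundle") for c in children)
--     if db_ok:
--         found.append("db_bundle/")
--         for c in sorted(children):
--             if c.startswith("db_bundle"):
--                 matched.append(c)
--                 break
--     else:
--         missing.append("db_bundle/")
--
--     # specs: canonical only (dir)
--     if "specs/" in children:
--         found.append("specs/")
--         matched.append("specs/")
--     else:
--         missing.append("specs/")
--
--     # demo: canonical only (dir)
--     if "demo/" in children:
--         found.append("demo/")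
--         matched.append("demo/")
--     else:
--         missing.append("demo/")
--
--     return found, missing, matched
-- ===== SOURCE B (Python) =====
-- def _resolve_requirements(children):
--     # One pass: keep the lexicographically smallest "concept*"/"db_bundle*" child
--     # and flags for the exact names; then assemble in canonical order.
--     best_concept = None
--     best_db = None
--     has_specs = False
--     has_demo = False
--     for c in children:
--         if c.startswith("concept") and (best_concept is None or c < best_concept):
--             best_concept = c
--         if c.startswith("db_bundle") and (best_db is None or c < best_db):
--             best_db = c
--         if c == "specs/":
--             has_specs = True
--         if c == "demo/":
--             has_demo = True
--     found, missing, matched = [], [], []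
--     if best_concept is not None:
--         found.append("concept/")
--         matched.append(best_concept)
--     else:
--         missing.append("concept/")
--     if best_db is not None:
--         found.append("db_bundle/")
--         matched.append(best_db)
--     else:
--         missing.append("db_bundle/")
--     if has_specs:
--         found.append("specs/")
--         matched.append("specs/")
--     else:
--         missing.append("specs/")
--     if has_demo:
--         found.append("demo/")
--         matched.append("demo/")
--     else:
--         missing.append("demo/")
--     return found, missing, matched
-- ===== Notes on version B (the rewrite author's own statement) =====
-- stated objective: alternative
-- what changed: Replaces the two sorted()-scans and repeated membership tests with a single pass over children that maintains the lexicographically smallest 'concept*'/'db_bundle*' child and two membership flags, assembling the result afterwards.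
import Mathlib
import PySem

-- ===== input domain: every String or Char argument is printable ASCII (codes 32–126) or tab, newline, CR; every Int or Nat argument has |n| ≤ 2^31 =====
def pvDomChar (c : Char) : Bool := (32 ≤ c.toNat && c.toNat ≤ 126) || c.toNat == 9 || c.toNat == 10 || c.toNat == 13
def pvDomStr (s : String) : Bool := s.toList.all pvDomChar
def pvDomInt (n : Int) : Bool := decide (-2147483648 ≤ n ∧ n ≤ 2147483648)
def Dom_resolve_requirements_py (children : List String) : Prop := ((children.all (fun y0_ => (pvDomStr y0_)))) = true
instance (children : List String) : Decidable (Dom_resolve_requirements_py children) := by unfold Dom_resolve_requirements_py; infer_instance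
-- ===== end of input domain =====

-- B replaces the two sorted() scans with one min-tracking pass over children (alternative single-pass algorithm).
-- ===== PORT A =====
def resolve_requirements_py (children : List String) : List String × List String × List String :=
  let found : List String := []
  let missing : List String := []
  let matched : List String := []
  let concept_ok := PySem.Set.contains children "concept/" || children.any (fun c => PySem.Str.startswith c "concept")
  let (found, missing, matched) :=
    if concept_ok then
      (found ++ ["concept/"], missing,
       match List.find? (fun c => PySem.Str.startswith c "concept") (PySem.List.sorted children (fun x => x) false) with
       | some c => matched ++ [c]
       | none => matched)
    else (found, missing ++ ["concept/"], matched)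
  let db_ok := PySem.Set.contains children "db_bundle/" || children.any (fun c => PySem.Str.startswith c "db_bundle")
  let (found, missing, matched) :=
    if db_ok then
      (found ++ ["db_bundle/"], missing,
       match List.find? (fun c => PySem.Str.startswith c "db_bundle") (PySem.List.sorted children (fun x => x) false) with
       | some c => matched ++ [c]
       | none => matched)
    else (found, missing ++ ["db_bundle/"], matched)
  let (found, missing, matched) :=
    if PySem.Set.contains children "specs/" then (found ++ ["specs/"], missing, matched ++ ["specs/"])
    else (found, missing ++ ["specs/"], matched)
  let (found, missing, matched) :=
    if PySem.Set.contains children "demo/" then (found ++ ["demo/"], missing, matched ++ ["demo/"])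
    else (found, missing ++ ["demo/"], matched)
  (found, missing, matched)

-- ===== PORT B =====
def pvStep (st : Option String × Option String × Bool × Bool) (c : String) :
    Option String × Option String × Bool × Bool :=
  let (bc, bd, hs, hd) := st
  let bc := if PySem.Str.startswith c "concept" then
      (match bc with | none => some c | some m => if c < m then some c else some m)
    else bc
  let bd := if PySem.Str.startswith c "db_bundle" then
      (match bd with | none => some c | some m => if c < m then some c else some m)
    else bd
  let hs := if c == "specs/" then true else hs
  let hd := if c == "demo/" then true else hd
  (bc, bd, hs, hd)

def resolve_requirements_py_alt (children : List String) : List String × List String × List String :=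
  let (bc, bd, hs, hd) := children.foldl pvStep (none, none, false, false)
  let (found, missing, matched) :=
    match bc with
    | some m => (["concept/"], ([] : List String), [m])
    | none => (([] : List String), ["concept/"], ([] : List String))
  let (found, missing, matched) :=
    match bd with
    | some m => (found ++ ["db_bundle/"], missing, matched ++ [m])
    | none => (found, missing ++ ["db_bundle/"], matched)
  let (found, missing, matched) :=
    if hs then (found ++ ["specs/"], missing, matched ++ ["specs/"])
    else (found, missing ++ ["specs/"], matched)
  let (found, missing, matched) :=
    if hd then (found ++ ["demo/"], missing, matched ++ ["demo/"])
    else (found, missing ++ ["demo/"], matched)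
  (found, missing, matched)

-- ===== PRECONDITION & SPEC =====
def Spec_resolve_requirements_py (children : List String) (out : List String × List String × List String) : Prop := out = resolve_requirements_py_alt children
instance (children : List String) (out : List String × List String × List String) : Decidable (Spec_resolve_requirements_py children out) := by unfold Spec_resolve_requirements_py; infer_instance

-- ===== CLAIM (what is proved, stated in full; the proofs are below) =====
def Claim_equal_resolve_requirements_py : Prop := ∀ (children : List String), Dom_resolve_requirements_py children → Spec_resolve_requirements_py children (resolve_requirements_py children)

-- ===== LEMMAS AND PROOFS =====

-- the min-tracking update B performs for one prefix
def pvMin (p : String → Bool) (b : Option String) (c : String) : Option String :=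
  if p c then (match b with | none => some c | some m => if c < m then some c else some m) else b

theorem pvMin_eq_min (p : String → Bool) (b : Option String) (c : String) :
    pvMin p b c = if p c then some (min c (b.getD c)) else b := by
  cases b with
  | none => simp [pvMin, min_self]
  | some m =>
      by_cases hp : p c
      · simp only [pvMin, hp, if_true, Option.getD_some]
        rcases lt_trichotomy c m with h | h | h
        · simp [h, min_eq_left h.le]
        · subst h; simp
        · simp [not_lt.mpr h.le, min_eq_right h.le]
      · simp [pvMin, hp]

theorem pvMin_rightComm (p : String → Bool) (b : Option String) (x y : String) :
    pvMin p (pvMin p b x) y = pvMin p (pvMin p b y) x := by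
  rcases Bool.eq_false_or_eq_true (p x) with hx | hx <;>
  rcases Bool.eq_false_or_eq_true (p y) with hy | hy <;>
  cases b <;> simp [pvMin_eq_min, hx, hy, min_comm, min_left_comm]

-- folding pvStep decomposes into the four independent component folds
theorem pvStep_decompose (l : List String) (bc bd : Option String) (hs hd : Bool) :
    l.foldl pvStep (bc, bd, hs, hd) =
      (l.foldl (pvMin (fun c => PySem.Str.startswith c "concept")) bc,
       l.foldl (pvMin (fun c => PySem.Str.startswith c "db_bundle")) bd,
       hs || l.any (fun c => c == "specs/"),
       hd || l.any (fun c => c == "demo/")) := by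
  induction l generalizing bc bd hs hd with
  | nil => simp
  | cons a t ih =>
      simp only [List.foldl_cons, List.any_cons, pvStep]
      rw [ih]
      by_cases h1 : a == "specs/" <;> by_cases h2 : a == "demo/" <;>
        simp [pvMin, h1, h2, Bool.or_assoc]

theorem pvMin_isSome (p : String → Bool) (l : List String) (b : Option String) :
    (l.foldl (pvMin p) b).isSome = (b.isSome || l.any p) := by
  induction l generalizing b with
  | nil => simp
  | cons a t ih =>
      have hstep : (pvMin p b a).isSome = (b.isSome || p a) := by
        cases b <;> rcases Bool.eq_false_or_eq_true (p a) with hp | hp <;>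
          simp [pvMin, hp] <;> split <;> rfl
      rw [List.foldl_cons, ih, hstep, List.any_cons, Bool.or_assoc]

theorem pvMin_keep (p : String → Bool) (l : List String) (a : String)
    (h : ∀ x ∈ l, a ≤ x) : l.foldl (pvMin p) (some a) = some a := by
  induction l with
  | nil => rfl
  | cons x t ih =>
      have hax : a ≤ x := h x (List.mem_cons_self ..)
      have step : pvMin p (some a) x = some a := by
        by_cases hp : p x
        · simp [pvMin, hp, not_lt.mpr hax]
        · simp [pvMin, hp]
      rw [List.foldl_cons, step]
      exact ih (fun y hy => h y (List.mem_cons_of_mem _ hy))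

theorem pvMin_sorted_find (p : String → Bool) (s : List String)
    (hs : s.Pairwise (fun a b => a ≤ b)) :
    s.foldl (pvMin p) none = s.find? p := by
  induction s with
  | nil => rfl
  | cons a t ih =>
      rcases List.pairwise_cons.mp hs with ⟨hall, htail⟩
      by_cases hp : p a
      · rw [List.foldl_cons, List.find?_cons_of_pos hp]
        have : pvMin p none a = some a := by simp [pvMin, hp]
        rw [this]
        exact pvMin_keep p t a hall
      · rw [List.foldl_cons, List.find?_cons_of_neg hp]
        have : pvMin p none a = none := by simp [pvMin, hp]
        rw [this]
        exact ih htail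

theorem pvMin_eq_sorted_find (p : String → Bool) (l : List String) :
    l.foldl (pvMin p) none = (PySem.List.sorted l (fun x => x) false).find? p := by
  have hperm : (PySem.List.sorted l (fun x => x) false).Perm l := PySem.List.sorted_perm ..
  have hpw : (PySem.List.sorted l (fun x => x) false).Pairwise (fun a b => a ≤ b) :=
    PySem.List.sorted_pairwise ..
  calc l.foldl (pvMin p) none
      = (PySem.List.sorted l (fun x => x) false).foldl (pvMin p) none :=
        (hperm.foldl_eq (f := pvMin p) (rcomm := ⟨fun b x y => pvMin_rightComm p b x y⟩) none).symm
    _ = (PySem.List.sorted l (fun x => x) false).find? p := pvMin_sorted_find p _ hpw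

-- the explicit `"concept/" in children` test is subsumed by the any-startswith test
theorem pv_ok_eq_any (l : List String) (s : String) (p : String → Bool) (hp : p s = true) :
    (PySem.Set.contains l s || l.any p) = l.any p := by
  by_cases h : PySem.Set.contains l s = true
  · have hm : s ∈ l := (PySem.Set.contains_iff ..).mp h
    have ha : l.any p = true := List.any_eq_true.mpr ⟨s, hm, hp⟩
    rw [h, ha]
    rfl
  · rw [Bool.eq_false_iff.mpr h, Bool.false_or]

theorem pv_contains_eq_any_beq (l : List String) (s : String) :
    PySem.Set.contains l s = l.any (fun c => c == s) := by
  simp only [PySem.Set.contains_eq_listContains, List.any_beq']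

-- ===== VERDICT (by name: the statement is the Claim_ definition above) =====
theorem resolve_requirements_py_spec : Claim_equal_resolve_requirements_py := by
  intro children _
  show resolve_requirements_py children = resolve_requirements_py_alt children
  unfold resolve_requirements_py resolve_requirements_py_alt
  rw [pvStep_decompose]
  have eC := (pvMin_eq_sorted_find (fun c => PySem.Str.startswith c "concept") children).symm
  have eD := (pvMin_eq_sorted_find (fun c => PySem.Str.startswith c "db_bundle") children).symm
  rw [eC, eD,
      pv_ok_eq_any children "concept/" _ (by decide),
      pv_ok_eq_any children "db_bundle/" _ (by decide),
      pv_contains_eq_any_beq children "specs/", pv_contains_eq_any_beq children "demo/"]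
  cases hc : children.foldl (pvMin (fun c => PySem.Str.startswith c "concept")) none <;>
  cases hd : children.foldl (pvMin (fun c => PySem.Str.startswith c "db_bundle")) none <;>
  · have hc' := (pvMin_isSome (fun c => PySem.Str.startswith c "concept") children none)
    have hd' := (pvMin_isSome (fun c => PySem.Str.startswith c "db_bundle") children none)
    rw [hc] at hc'; rw [hd] at hd'
    simp only [Option.isSome_none, Option.isSome_some, Bool.false_or] at hc' hd'
    rw [← hc', ← hd']
    rcases Bool.eq_false_or_eq_true (children.any (fun c => c == "specs/")) with h1 | h1 <;>
    rcases Bool.eq_false_or_eq_true (children.any (fun c => c == "demo/")) with h2 | h2 <;>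
      rw [h1, h2] <;> rfl
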